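-- pv_equiv track=rewrite | github.com/splach-coder/azure-upload | ferminich/service/extrators.py | split_items_into_array
-- ===== SOURCE A (Python) =====
-- def split_items_into_array(text: dict) -> list:
--     """
--     Splits a string into an array of items based on the condition that each item ends
--     with a line containing the word 'Shipping'.
--
--     Parameters:
--         text (str): The input text to be split.
--
--     Returns:
--         list: An array of items as strings.
--     """
--     # Initialize variables
--     items = []
--
--     for key, value in text.items():
--         # Split the input text into lines
--         lines = value.split("\n")
--
--         current_item = []
--
--         # Iterate through each line
--         for line in lines:
--             # Add the line to the current item
--             current_item.append(line)
--
--             # Check if the current line contains "Shipping"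
--             if "Shipping" in line:
--                 # Join the lines of the current item and add to items
--                 items.append("\n".join(current_item))
--                 # Reset the current item for the next batch
--                 current_item = []
--
--         # Handle any remaining lines that weren't added to an item
--         if current_item:
--             items.append("\n".join(current_item))
--
--     return items
-- ===== SOURCE B (Python) =====
-- def split_items_into_array(text: dict) -> list:
--     def chunks(lines):
--         out = []
--         while lines:
--             i = 0
--             while i < len(lines) and "Shipping" not in lines[i]:
--                 i += 1
--             if i == len(lines):
--                 out.append("\n".join(lines))
--                 break
--             out.append("\n".join(lines[:i + 1]))
--             lines = lines[i + 1:]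
--         return out
--
--     items = []
--     for value in text.values():
--         items.extend(chunks(value.split("\n")))
--     return items
-- ===== Notes on version B (the rewrite author's own statement) =====
-- stated objective: alternative
-- what changed: Replaces A's accumulate-and-reset line buffer with a scan-for-next-'Shipping'-boundary-then-slice decomposition (find the next boundary index, emit the joined slice, continue on the remainder), with no buffer state carried across lines.
import Mathlib
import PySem

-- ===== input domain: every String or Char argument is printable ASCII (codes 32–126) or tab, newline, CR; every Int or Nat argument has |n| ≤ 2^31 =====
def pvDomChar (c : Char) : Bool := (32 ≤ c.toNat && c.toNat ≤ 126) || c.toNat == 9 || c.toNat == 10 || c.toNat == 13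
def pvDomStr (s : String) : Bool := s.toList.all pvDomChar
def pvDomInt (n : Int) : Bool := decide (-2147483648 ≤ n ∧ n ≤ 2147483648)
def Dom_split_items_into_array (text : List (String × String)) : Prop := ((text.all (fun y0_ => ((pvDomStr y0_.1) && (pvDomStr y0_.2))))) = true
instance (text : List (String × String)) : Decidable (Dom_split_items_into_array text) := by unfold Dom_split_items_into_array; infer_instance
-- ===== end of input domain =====

-- B replaces A's accumulate-and-reset line buffer with a find-next-'Shipping'-boundary-then-slice decomposition (alternative; same cost).

-- ===== PORT A =====
def split_items_into_array (text : List (String × String)) : List String :=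
  text.foldl (fun items kv =>
    let lines := (PySem.Str.split? kv.2 "\n").getD []
    let st := lines.foldl (fun (st : List String × List String) line =>
      let cur := st.2 ++ [line]
      if PySem.Str.isIn "Shipping" line then (st.1 ++ [PySem.Str.join "\n" cur], [])
      else (st.1, cur)) (items, [])
    if st.2 ≠ [] then st.1 ++ [PySem.Str.join "\n" st.2] else st.1) []

-- ===== PORT B =====
-- chunks: scan to the first 'Shipping' line (takeWhile/dropWhile = Source B's index scan + slices),
-- emit the joined slice, recurse on the remainder.
def chunksB (lines : List String) : List String :=
  match lines with
  | [] => []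
  | l :: rest =>
    match h : (l :: rest).dropWhile (fun x => !PySem.Str.isIn "Shipping" x) with
    | [] => [PySem.Str.join "\n" (l :: rest)]
    | s :: rest' =>
      PySem.Str.join "\n" ((l :: rest).takeWhile (fun x => !PySem.Str.isIn "Shipping" x) ++ [s])
        :: chunksB rest'
termination_by lines.length
decreasing_by
  have hle : ((l :: rest).dropWhile (fun x => !PySem.Str.isIn "Shipping" x)).length ≤ (l :: rest).length :=
    List.length_dropWhile_le _ _
  rw [h] at hle; simp at hle ⊢; omega

def split_items_into_array_alt (text : List (String × String)) : List String :=
  text.foldl (fun items kv => items ++ chunksB ((PySem.Str.split? kv.2 "\n").getD [])) []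

-- ===== PRECONDITION & SPEC =====
def Spec_split_items_into_array (text : List (String × String)) (out : List String) : Prop := out = split_items_into_array_alt text
instance (text : List (String × String)) (out : List String) : Decidable (Spec_split_items_into_array text out) := by unfold Spec_split_items_into_array; infer_instance

-- ===== CLAIM (what is proved, stated in full; the proofs are below) =====
def Claim_equal_split_items_into_array : Prop := ∀ (text : List (String × String)), Dom_split_items_into_array text → Spec_split_items_into_array text (split_items_into_array text)

-- ===== LEMMAS AND PROOFS =====

-- A's inner loop step, named for the proofs (definitionally the lambda in the port)
def stepA (st : List String × List String) (line : String) : List String × List String :=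
  let cur := st.2 ++ [line]
  if PySem.Str.isIn "Shipping" line then (st.1 ++ [PySem.Str.join "\n" cur], [])
  else (st.1, cur)

lemma foldA_shift (lines : List String) (items cur : List String) :
    lines.foldl stepA (items, cur) =
      (items ++ (lines.foldl stepA ([], cur)).1, (lines.foldl stepA ([], cur)).2) := by
  induction lines generalizing items cur with
  | nil => simp
  | cons l rest ih =>
    simp only [List.foldl_cons, stepA]
    by_cases h : PySem.Str.isIn "Shipping" l = true
    · simp only [h, if_true]
      rw [ih (items ++ _), ih ([] ++ _)]
      simp
    · simp only [Bool.not_eq_true] at h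
      simp only [h, Bool.false_eq_true, if_false]
      rw [ih items, ih ([])]

-- A's per-value result, started with buffer cur
def emitA (lines cur : List String) : List String :=
  let st := lines.foldl stepA ([], cur)
  if st.2 ≠ [] then st.1 ++ [PySem.Str.join "\n" st.2] else st.1

lemma takeWhile_append_all {p : String → Bool} (xs ys : List String)
    (h : ∀ x ∈ xs, p x = true) :
    (xs ++ ys).takeWhile p = xs ++ ys.takeWhile p := by
  induction xs with
  | nil => simp
  | cons a t ih =>
    simp only [List.cons_append, List.takeWhile_cons, h a (by simp), if_true]
    rw [ih (fun x hx => h x (by simp [hx]))]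

lemma dropWhile_append_all {p : String → Bool} (xs ys : List String)
    (h : ∀ x ∈ xs, p x = true) :
    (xs ++ ys).dropWhile p = ys.dropWhile p := by
  induction xs with
  | nil => simp
  | cons a t ih =>
    simp only [List.cons_append, List.dropWhile_cons, h a (by simp), if_true]
    exact ih (fun x hx => h x (by simp [hx]))

lemma chunksB_of_drop_nil (l : String) (rest : List String)
    (hd : (l :: rest).dropWhile (fun x => !PySem.Str.isIn "Shipping" x) = []) :
    chunksB (l :: rest) = [PySem.Str.join "\n" (l :: rest)] := by
  rw [chunksB]
  split
  · rfl
  · rename_i s rest' h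
    rw [hd] at h
    cases h

lemma chunksB_of_drop_cons (l : String) (rest : List String) (s : String) (rest' : List String)
    (hd : (l :: rest).dropWhile (fun x => !PySem.Str.isIn "Shipping" x) = s :: rest') :
    chunksB (l :: rest) =
      PySem.Str.join "\n" ((l :: rest).takeWhile (fun x => !PySem.Str.isIn "Shipping" x) ++ [s])
        :: chunksB rest' := by
  rw [chunksB]
  split
  · rename_i h
    rw [hd] at h
    cases h
  · rename_i s0 r0 h
    rw [hd] at h
    cases h
    rfl

lemma emitA_eq_chunksB (lines : List String) :
    ∀ cur, (∀ x ∈ cur, PySem.Str.isIn "Shipping" x = false) →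
      emitA lines cur = chunksB (cur ++ lines) := by
  induction lines with
  | nil =>
    intro cur hcur
    cases cur with
    | nil => simp [emitA, chunksB]
    | cons c t =>
      have hdrop : (c :: t).dropWhile (fun x => !PySem.Str.isIn "Shipping" x) = [] := by
        rw [List.dropWhile_eq_nil_iff]
        intro x hx
        rw [hcur x hx]
        rfl
      rw [List.append_nil, chunksB_of_drop_nil c t hdrop]
      simp [emitA]
  | cons l rest ih =>
    intro cur hcur
    have hcur' : ∀ x ∈ cur, (!PySem.Str.isIn "Shipping" x) = true := by
      intro x hx; rw [hcur x hx]; rfl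
    by_cases h : PySem.Str.isIn "Shipping" l = true
    · have hdrop : (cur ++ l :: rest).dropWhile (fun x => !PySem.Str.isIn "Shipping" x)
          = l :: rest := by
        rw [dropWhile_append_all _ _ hcur', List.dropWhile_cons]
        simp only [h, Bool.not_true, Bool.false_eq_true, if_false]
      have htake : (cur ++ l :: rest).takeWhile (fun x => !PySem.Str.isIn "Shipping" x)
          = cur := by
        rw [takeWhile_append_all _ _ hcur', List.takeWhile_cons]
        simp only [h, Bool.not_true, Bool.false_eq_true, if_false, List.append_nil]
      obtain ⟨c, t, hct⟩ := List.exists_cons_of_ne_nil (l := cur ++ l :: rest) (by simp)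
      rw [hct, chunksB_of_drop_cons c t l rest (by rw [← hct]; exact hdrop), ← hct, htake]
      have hbase := ih [] (by simp)
      rw [List.nil_append] at hbase
      rw [← hbase]
      -- left side: unfold one step of A's loop
      simp only [emitA, List.foldl_cons, stepA, h, if_true, List.nil_append]
      rw [foldA_shift]
      set st := rest.foldl stepA ([], []) with hst
      by_cases h2 : st.2 = []
      · simp [h2]
      · simp [h2]
    · simp only [Bool.not_eq_true] at h
      have hstep : (l :: rest).foldl stepA ([], cur) = rest.foldl stepA ([], cur ++ [l]) := by
        simp only [List.foldl_cons, stepA, h, Bool.false_eq_true, if_false]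
      have hA : emitA (l :: rest) cur = emitA rest (cur ++ [l]) := by
        simp only [emitA, hstep]
      rw [hA, ih (cur ++ [l]) (by
        intro x hx
        rcases List.mem_append.mp hx with h1 | h1
        · exact hcur x h1
        · simp only [List.mem_singleton] at h1; rw [h1]; exact h)]
      simp

lemma stepOuter_eq (items : List String) (kv : String × String) :
    (let lines := (PySem.Str.split? kv.2 "\n").getD []
     let st := lines.foldl (fun (st : List String × List String) line =>
       let cur := st.2 ++ [line]
       if PySem.Str.isIn "Shipping" line then (st.1 ++ [PySem.Str.join "\n" cur], [])
       else (st.1, cur)) (items, [])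
     if st.2 ≠ [] then st.1 ++ [PySem.Str.join "\n" st.2] else st.1)
    = items ++ chunksB ((PySem.Str.split? kv.2 "\n").getD []) := by
  show (let lines := (PySem.Str.split? kv.2 "\n").getD []
        let st := lines.foldl stepA (items, [])
        if st.2 ≠ [] then st.1 ++ [PySem.Str.join "\n" st.2] else st.1) = _
  set lines := (PySem.Str.split? kv.2 "\n").getD [] with hl
  have hchunk := emitA_eq_chunksB lines [] (by simp)
  rw [List.nil_append] at hchunk
  rw [← hchunk]
  simp only [emitA]
  rw [foldA_shift]
  set st := lines.foldl stepA ([], []) with hst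
  by_cases h2 : st.2 = []
  · simp [h2]
  · simp [h2]

-- ===== VERDICT (by name: the statement is the Claim_ definition above) =====
lemma ports_eq (text : List (String × String)) :
    split_items_into_array text = split_items_into_array_alt text := by
  unfold split_items_into_array split_items_into_array_alt
  induction text using List.reverseRecOn with
  | nil => rfl
  | append_singleton t kv ih =>
    rw [List.foldl_append, List.foldl_append, ih]
    simp only [List.foldl_cons, List.foldl_nil]
    exact stepOuter_eq _ kv

theorem split_items_into_array_spec : Claim_equal_split_items_into_array :=
  fun text _ => ports_eq text
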